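-- pv_equiv track=rewrite | github.com/iajayyadav/SAICRT | 4_August_Batch/Python/Array/arrayHWspyNumber4.py | spyNumber
-- ===== SOURCE A (Python) =====
-- def spyNumber(n):
--     sum=0
--     prod=1
--     a=n
--     while(n):
--         b=n%10
--         sum=sum+b
--         prod=prod*b
--         n=n//10
--     if(prod==sum):
--         return True
--     return False
-- ===== SOURCE B (Python) =====
-- def spyNumber(n):
--     counts = {}
--     for c in str(n):
--         counts[c] = counts.get(c, 0) + 1
--     total = 0
--     prod = 1
--     for c, k in counts.items():
--         d = int(c)
--         total += d * k
--         prod *= d ** k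
--     return total == prod
-- ===== Notes on version B (the rewrite author's own statement) =====
-- stated objective: alternative
-- what changed: B groups the decimal digits by frequency in a dict built from str(n) and compares the weighted sum (sum of d*k) with a product of powers (product of d**k), instead of A's divmod-by-10 while loop accumulating sum and product digit by digit; Pre_ excludes negative n, on which A's while loop never terminates.
-- intended difference: On n = 0, A returns False (its while loop never runs, leaving prod=1 against sum=0) while B returns True, the intended value since 0's digit sum and digit product are both 0. — e.g. on spyNumber(0): A returns false, B returns true
import Mathlib
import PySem

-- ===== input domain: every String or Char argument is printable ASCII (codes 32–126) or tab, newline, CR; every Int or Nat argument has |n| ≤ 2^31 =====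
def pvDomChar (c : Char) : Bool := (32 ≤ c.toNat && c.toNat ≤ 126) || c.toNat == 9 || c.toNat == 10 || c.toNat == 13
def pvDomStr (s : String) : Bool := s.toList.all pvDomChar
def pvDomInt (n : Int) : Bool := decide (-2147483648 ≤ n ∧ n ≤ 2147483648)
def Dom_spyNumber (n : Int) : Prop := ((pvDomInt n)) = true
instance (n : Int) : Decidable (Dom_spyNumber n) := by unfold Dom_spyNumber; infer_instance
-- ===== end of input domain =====

-- B groups the digits of str(n) by frequency in a dict and compares sum(d*k) with prod(d**k),
-- instead of A's divmod-by-10 loop over individual digits; at n = 0 B returns the intended True.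

-- ===== PORT A =====
-- A's 'while n:' loop. Fuel 40 exceeds the decimal digit count of every n in Dom_spyNumber,
-- so on every admitted input the loop runs exactly as Python's does (on negative n Python
-- diverges; those inputs are excluded by Pre_spyNumber).
def spyLoop : Nat → Int → Int → Int → Int × Int
  | 0, _, s, p => (s, p)
  | fuel + 1, n, s, p =>
    if n ≠ 0 then
      let b := PySem.Int.mod n 10
      spyLoop fuel (PySem.Int.floordiv n 10) (s + b) (p * b)
    else (s, p)

def spyNumber (n : Int) : Bool :=
  -- sum=0; prod=1; a=n (unused); while loop; then 'if prod==sum: return True / return False'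
  let r := spyLoop 40 n 0 1
  if r.2 == r.1 then true else false

-- ===== PORT B =====
-- int(c); every char of str(n) for n ≥ 0 is a decimal digit, so the ValueError case (none) is
-- unreachable under Pre_spyNumber
def digitVal (c : Char) : Int := (PySem.Int.ofChars? [c]).getD 0

def spyNumber_alt (n : Int) : Bool :=
  -- counts = {}; for c in str(n): counts[c] = counts.get(c, 0) + 1
  let counts : PySem.Dict Char Int :=
    (PySem.Int.toChars n).foldl (fun d c => d.insert c (d.getD c 0 + 1)) PySem.Dict.empty
  -- total = 0; prod = 1; for c, k in counts.items(): d = int(c); total += d*k; prod *= d**k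
  -- (d ** k ported as d ^ k.toNat: exact since every count k is ≥ 1)
  let r : Int × Int := counts.items.foldl
      (fun acc p => (acc.1 + digitVal p.1 * p.2, acc.2 * digitVal p.1 ^ p.2.toNat)) (0, 1)
  r.1 == r.2

-- ===== PRECONDITION & SPEC =====
-- A's while loop never terminates for negative n (n//10 stalls at -1), so Pre_ admits exactly
-- the inputs on which the Python A returns: the non-negative integers.
def Pre_spyNumber (n : Int) : Prop := 0 ≤ n
instance (n : Int) : Decidable (Pre_spyNumber n) := by unfold Pre_spyNumber; infer_instance
def pvWitness_spyNumber : Int := (22)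

-- On n = 0, A returns False (its while loop never runs, leaving prod=1 against sum=0) while B
-- returns True, the intended value since 0's digit sum and digit product are both 0.
def D_spyNumber (n : Int) : Prop := n = 0
instance (n : Int) : Decidable (D_spyNumber n) := by unfold D_spyNumber; infer_instance

def Spec_spyNumber (n : Int) (out : Bool) : Prop := ¬ D_spyNumber n → out = spyNumber_alt n
instance (n : Int) (out : Bool) : Decidable (Spec_spyNumber n out) := by unfold Spec_spyNumber; infer_instance

def pvDiffWitness_spyNumber : Int := (0)
def pvDiffWitnessOut_spyNumber : Bool × Bool := (false, true)

-- ===== CLAIM (what is proved, stated in full; the proofs are below) =====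
def Claim_unchanged_spyNumber : Prop := ∀ (n : Int), Dom_spyNumber n → Pre_spyNumber n → Spec_spyNumber n (spyNumber n)
def Claim_changed_spyNumber : Prop := Dom_spyNumber (pvDiffWitness_spyNumber) ∧ Pre_spyNumber (pvDiffWitness_spyNumber) ∧ D_spyNumber (pvDiffWitness_spyNumber) ∧ spyNumber (pvDiffWitness_spyNumber) = pvDiffWitnessOut_spyNumber.1 ∧ spyNumber_alt (pvDiffWitness_spyNumber) = pvDiffWitnessOut_spyNumber.2 ∧ pvDiffWitnessOut_spyNumber.1 ≠ pvDiffWitnessOut_spyNumber.2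
def Claim_exact_spyNumber : Prop := ∀ (n : Int), Dom_spyNumber n → Pre_spyNumber n → D_spyNumber n → spyNumber n ≠ spyNumber_alt n

-- ===== LEMMAS AND PROOFS =====

-- LSB-first list of decimal digits of m
def rep (m : Nat) : List Nat :=
  if m = 0 then [] else m % 10 :: rep (m / 10)
decreasing_by exact Nat.div_lt_self (by omega) (by omega)

lemma rep_lt (m : Nat) : ∀ d ∈ rep m, d < 10 := by
  induction m using Nat.strong_induction_on with
  | _ m ih =>
    rw [rep]
    split
    · simp
    · intro d hd
      rcases List.mem_cons.mp hd with h | h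
      · omega
      · exact ih (m / 10) (Nat.div_lt_self (by omega) (by omega)) d h

lemma digit_digitVal (d : Nat) (hd : d < 10) : digitVal (Nat.digitChar d) = (d : Int) := by
  interval_cases d <;> decide

-- A's loop computes sum and product of the digits
lemma spyLoop_eq (fuel : Nat) : ∀ (m : Nat) (s p : Int), m < 10 ^ fuel →
    spyLoop fuel (m : Int) s p = (s + ((rep m).sum : Int), p * ((rep m).prod : Int)) := by
  induction fuel with
  | zero =>
    intro m s p h
    have : m = 0 := by omega
    subst this
    simp [spyLoop, rep]
  | succ fuel ih =>
    intro m s p h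
    by_cases hm : m = 0
    · subst hm; simp [spyLoop, rep]
    · have hcast : ((m : Int) ≠ 0) := by exact_mod_cast hm
      rw [spyLoop]
      simp only [hcast, ne_eq, not_false_eq_true, if_true]
      have hmod : PySem.Int.mod (m : Int) 10 = ((m % 10 : Nat) : Int) := by
        exact_mod_cast PySem.Int.mod_natCast m 10
      have hdiv : PySem.Int.floordiv (m : Int) 10 = ((m / 10 : Nat) : Int) := by
        exact_mod_cast PySem.Int.floordiv_natCast m 10
      rw [hmod, hdiv]
      rw [ih (m / 10) _ _ (by
        rw [Nat.div_lt_iff_lt_mul (by omega : 0 < 10)]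
        rw [pow_succ] at h
        omega)]
      conv_rhs => rw [rep, if_neg hm]
      simp only [List.sum_cons, List.prod_cons]
      push_cast
      simp only [Prod.mk.injEq]
      constructor <;> ring

-- Nat.toDigitsCore produces the digit characters, MSB first
lemma toDigitsCore_eq (fuel : Nat) : ∀ (m : Nat) (acc : List Char), 0 < m → m ≤ fuel →
    Nat.toDigitsCore 10 fuel m acc = (rep m).reverse.map Nat.digitChar ++ acc := by
  induction fuel with
  | zero => intro m acc h1 h2; omega
  | succ fuel ih =>
    intro m acc h1 h2
    rw [Nat.toDigitsCore]
    by_cases hq : m / 10 = 0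
    · simp only [hq, if_pos]
      have hrep0 : rep (m / 10) = [] := by rw [hq, rep]; simp
      rw [rep, if_neg (by omega), hrep0]
      simp
    · simp only [hq, if_false]
      rw [ih (m / 10) _ (by omega) (by
        have : m / 10 < m := Nat.div_lt_self (by omega) (by omega)
        omega)]
      conv_rhs => rw [rep, if_neg (by omega : ¬ m = 0)]
      simp [List.map_append]

-- a 'prod *= f(p)' loop is the product of the mapped list
lemma foldl_mul_map {α : Type} (l : List α) (f : α → Int) (a : Int) :
    l.foldl (fun acc x => acc * f x) a = a * (l.map f).prod := by
  induction l generalizing a with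
  | nil => simp
  | cons x t ih => simp [ih, mul_assoc]

-- grouping: sum over distinct chars of value*count = plain sum over the list
lemma grouped_sum (L : List Char) (f : Char → Int) :
    ((PySem.Set.ofList L).map (fun c => f c * (L.count c : Int))).sum = (L.map f).sum := by
  rw [Finset.sum_list_map_count L f]
  rw [← List.sum_toFinset _ (PySem.Set.nodup_ofList L)]
  have hfs : (PySem.Set.ofList L : List Char).toFinset = L.toFinset := by
    ext c; simp [PySem.Set.mem_ofList]
  rw [hfs]
  apply Finset.sum_congr rfl
  intro c _
  simp [mul_comm]

-- grouping: product over distinct chars of value^count = plain product over the list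
lemma grouped_prod (L : List Char) (f : Char → Int) :
    ((PySem.Set.ofList L).map (fun c => f c ^ L.count c)).prod = (L.map f).prod := by
  rw [Finset.prod_list_map_count L f]
  rw [← List.prod_toFinset _ (PySem.Set.nodup_ofList L)]
  have hfs : (PySem.Set.ofList L : List Char).toFinset = L.toFinset := by
    ext c; simp [PySem.Set.mem_ofList]
  rw [hfs]

lemma toChars_chars (m : Nat) (hm : m ≠ 0) :
    PySem.Int.toChars (m : Int) = (rep m).reverse.map Nat.digitChar := by
  unfold PySem.Int.toChars
  rw [if_neg (by simp : ¬ ((m : Int) < 0))]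
  simp only [Int.toNat_natCast]
  unfold Nat.toDigits
  rw [toDigitsCore_eq (m + 1) m [] (by omega) (by omega), List.append_nil]

theorem spyNumber_main (n : Int) (hdom : Dom_spyNumber n) (hpre : Pre_spyNumber n)
    (hd : ¬ D_spyNumber n) : spyNumber n = spyNumber_alt n := by
  unfold Pre_spyNumber at hpre
  obtain ⟨m, rfl⟩ : ∃ m : Nat, n = (m : Int) := ⟨n.toNat, (Int.toNat_of_nonneg hpre).symm⟩
  have hm : m ≠ 0 := by
    intro h; exact hd (by simp [D_spyNumber, h])
  -- A side
  have hdombound : (m : Int) ≤ 2147483648 := by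
    unfold Dom_spyNumber pvDomInt at hdom
    simpa using (of_decide_eq_true hdom).2
  have hmlt : m < 10 ^ 40 := by
    have : m ≤ 2147483648 := by exact_mod_cast hdombound
    calc m ≤ 2147483648 := this
      _ < 10 ^ 40 := by norm_num
  have hA : spyNumber (m : Int) =
      decide ((1 : Int) * ((rep m).prod : Int) = 0 + ((rep m).sum : Int)) := by
    unfold spyNumber
    rw [spyLoop_eq 40 m 0 1 hmlt]
    simp [Bool.beq_eq_decide_eq]
  -- B side
  set L := PySem.Int.toChars (m : Int) with hL
  have hcounts : L.foldl (fun d c => d.insert c (d.getD c 0 + 1)) PySem.Dict.empty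
      = PySem.Dict.counter L := PySem.Dict.foldl_insert_getD_add_one_eq_counter L
  have hdigits : L.map digitVal = (rep m).reverse.map (Nat.cast : Nat → Int) := by
    rw [hL, toChars_chars m hm, List.map_map]
    apply List.map_congr_left
    intro d hd'
    have : d < 10 := rep_lt m d (List.mem_reverse.mp hd')
    simpa using digit_digitVal d this
  have hB : spyNumber_alt (m : Int) =
      decide ((L.map digitVal).sum = (L.map digitVal).prod) := by
    unfold spyNumber_alt
    simp only [← hL, hcounts, PySem.Dict.items_counter]
    rw [PySem.List.foldl_prod_mk
      (f := fun (acc : Int) (p : Char × Int) => acc + digitVal p.1 * p.2)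
      (g := fun (acc : Int) (p : Char × Int) => acc * digitVal p.1 ^ p.2.toNat)]
    rw [PySem.List.foldl_add (g := fun (p : Char × Int) => digitVal p.1 * p.2)]
    rw [foldl_mul_map _ (fun (p : Char × Int) => digitVal p.1 ^ p.2.toNat)]
    simp only [List.map_map, zero_add, one_mul]
    have hsum : ((PySem.Set.ofList L).map
        ((fun (p : Char × Int) => digitVal p.1 * p.2) ∘ fun k => (k, (L.count k : Int)))).sum
        = (L.map digitVal).sum := by
      rw [show ((fun (p : Char × Int) => digitVal p.1 * p.2) ∘ fun k => (k, (L.count k : Int)))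
          = fun c => digitVal c * (L.count c : Int) from rfl]
      exact grouped_sum L digitVal
    have hprod : ((PySem.Set.ofList L).map
        ((fun (p : Char × Int) => digitVal p.1 ^ p.2.toNat) ∘ fun k => (k, (L.count k : Int)))).prod
        = (L.map digitVal).prod := by
      rw [show ((fun (p : Char × Int) => digitVal p.1 ^ p.2.toNat) ∘ fun k => (k, (L.count k : Int)))
          = fun c => digitVal c ^ L.count c from funext (fun c => by simp)]
      exact grouped_prod L digitVal
    rw [hsum, hprod]
    simp [Bool.beq_eq_decide_eq]
  rw [hA, hB, hdigits]
  rw [List.map_reverse, List.sum_reverse, List.prod_reverse,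
    ← Nat.cast_list_sum, ← Nat.cast_list_prod]
  simp only [one_mul, zero_add]
  rw [decide_eq_decide]
  exact eq_comm

-- ===== VERDICT (by name: the statements are the Claim_ definitions above) =====
theorem spyNumber_spec : Claim_unchanged_spyNumber := by
  intro n hdom hpre hd
  exact spyNumber_main n hdom hpre hd

theorem spyNumber_changed : Claim_changed_spyNumber := by
  unfold Claim_changed_spyNumber; decide

theorem spyNumber_tight : Claim_exact_spyNumber := by
  intro n _ _ hd
  unfold D_spyNumber at hd
  subst hd
  decide
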